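-- pv_equiv track=rewrite | github.com/dzianismironau/pp1 | 04-Subroutines/ex40.py | f
-- ===== SOURCE A (Python) =====
-- def f(number):
--     result = 0
--     for i in range(1, 10):
--         count = 0
--         for j in str(number):
--             if int(j) == i:
--                 count += 1
--         if count > 1:
--             result += i*count
--     return result
-- ===== SOURCE B (Python) =====
-- def f(number):
--     s = sorted(int(c) for c in str(number))
--     total = 0
--     for k, d in enumerate(s):
--         if (k > 0 and s[k - 1] == d) or (k + 1 < len(s) and s[k + 1] == d):
--             total += d
--     return total
-- ===== Notes on version B (the rewrite author's own statement) =====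
-- stated objective: alternative
-- what changed: B sorts the digit list once and adds every digit that equals a neighbour in the sorted order, instead of A's nine per-digit rescans of str(number) with count-and-multiply.
import Mathlib
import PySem

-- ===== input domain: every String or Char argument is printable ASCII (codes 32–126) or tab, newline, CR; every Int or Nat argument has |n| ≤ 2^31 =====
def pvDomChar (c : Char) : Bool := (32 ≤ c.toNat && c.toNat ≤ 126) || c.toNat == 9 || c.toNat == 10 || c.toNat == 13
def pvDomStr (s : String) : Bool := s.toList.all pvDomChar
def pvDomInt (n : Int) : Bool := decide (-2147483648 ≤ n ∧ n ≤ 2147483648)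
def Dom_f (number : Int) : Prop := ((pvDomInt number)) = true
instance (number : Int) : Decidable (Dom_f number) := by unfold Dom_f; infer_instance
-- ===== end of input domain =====

-- B sorts the digits once and adds every digit equal to a neighbour in the sorted order, replacing A's nine count-and-multiply rescans of str(number) (alternative algorithm, similar cost).

-- shared helper: Python's int(j) for a single character j (both sources call int on one char)
def pvDigit (c : Char) : Int := (PySem.Int.ofChars? [c]).getD 0

-- ===== PORT A =====
def f (number : Int) : Int :=
  (PySem.List.pyRange 1 10 1).foldl (fun result i =>
    let count := (PySem.Int.toStr number).toList.foldl
      (fun count j => if pvDigit j == i then count + 1 else count) (0 : Int)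
    if count > 1 then result + i * count else result) 0

-- ===== PORT B =====
def f_alt (number : Int) : Int :=
  let s := PySem.List.sorted ((PySem.Int.toStr number).toList.map pvDigit) (fun x => x) false
  (PySem.List.enumerate s).foldl (fun total kd =>
    if (0 < kd.1 ∧ PySem.List.pyGetD s (kd.1 - 1) 0 = kd.2) ∨
       (kd.1 + 1 < PySem.List.len s ∧ PySem.List.pyGetD s (kd.1 + 1) 0 = kd.2)
    then total + kd.2 else total) 0

-- ===== PRECONDITION & SPEC =====
-- Pre_f excludes negative numbers: str(number) then starts with '-' and both Pythons raise ValueError on int('-').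
def Pre_f (number : Int) : Prop := 0 ≤ number
instance (number : Int) : Decidable (Pre_f number) := by unfold Pre_f; infer_instance
def pvWitness_f : Int := 112233
def Spec_f (number : Int) (out : Int) : Prop := out = f_alt number
instance (number : Int) (out : Int) : Decidable (Spec_f number out) := by unfold Spec_f; infer_instance

-- ===== CLAIM (what is proved, stated in full; the proofs are below) =====
def Claim_equal_f : Prop := ∀ (number : Int), Dom_f number → Pre_f number → Spec_f number (f number)

-- ===== LEMMAS AND PROOFS =====

-- every character emitted by Nat.toDigitsCore base 10 is a digitChar of a value < 10 (or came from the accumulator)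
theorem tdc_mem (fuel n : Nat) (ds : List Char) (c : Char)
    (h : c ∈ Nat.toDigitsCore 10 fuel n ds) : c ∈ ds ∨ ∃ k, k < 10 ∧ c = Nat.digitChar k := by
  induction fuel generalizing n ds with
  | zero => simp [Nat.toDigitsCore] at h; exact Or.inl h
  | succ fuel ih =>
    rw [Nat.toDigitsCore] at h
    by_cases h0 : n / 10 = 0
    · simp [h0] at h
      rcases h with h | h
      · exact Or.inr ⟨n % 10, Nat.mod_lt _ (by norm_num), h⟩
      · exact Or.inl h
    · simp [h0] at h
      rcases ih _ _ h with hh | hh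
      · rcases List.mem_cons.mp hh with h2 | h2
        · exact Or.inr ⟨n % 10, Nat.mod_lt _ (by norm_num), h2⟩
        · exact Or.inl h2
      · exact Or.inr hh

theorem pvDigit_digitChar (k : Nat) (hk : k < 10) :
    0 ≤ pvDigit (Nat.digitChar k) ∧ pvDigit (Nat.digitChar k) ≤ 9 := by
  interval_cases k <;> decide

-- for number ≥ 0 every digit value produced from str(number) lies in [0, 9]
theorem toChars_bound (n : Int) (h : 0 ≤ n) :
    ∀ c ∈ PySem.Int.toChars n, 0 ≤ pvDigit c ∧ pvDigit c ≤ 9 := by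
  intro c hc
  unfold PySem.Int.toChars at hc
  rw [if_neg (by omega)] at hc
  unfold Nat.toDigits at hc
  rcases tdc_mem _ _ _ _ hc with h' | ⟨k, hk, rfl⟩
  · simp at h'
  · exact pvDigit_digitChar k hk

-- A's inner loop counts the characters whose digit value is i
theorem count_fold (L : List Char) (i acc : Int) :
    L.foldl (fun count j => if pvDigit j == i then count + 1 else count) acc
      = acc + ((L.map pvDigit).count i : Int) := by
  have h := PySem.List.foldl_beq_add_one (l := L.map pvDigit) (v := i) (a := acc)
  rw [List.foldl_map] at h
  exact h

-- a guarded-accumulation loop is the sum of its guarded terms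
theorem foldl_if_add (l : List Int) (p : Int → Prop) [DecidablePred p] (g : Int → Int) (a : Int) :
    l.foldl (fun acc i => if p i then acc + g i else acc) a
      = a + (l.map (fun i => if p i then g i else 0)).sum := by
  induction l generalizing a with
  | nil => simp
  | cons x t ih => simp only [List.foldl_cons, List.map_cons, List.sum_cons, ih]; split_ifs <;> ring

-- count inside a filter by a value-determined predicate
theorem count_filter_eq (l : List Int) (p : Int → Bool) (a : Int) :
    (l.filter p).count a = if p a then l.count a else 0 := by
  by_cases h : p a
  · simp [h]
  · rw [if_neg h, List.count_eq_zero]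
    intro hm
    exact h (List.mem_filter.mp hm).2

-- a sum over a list whose elements all lie in a duplicate-free value list is Σ v * count v
theorem sum_eq_counts (vals : List Int) (L : List Int) (hnd : vals.Nodup)
    (hsub : ∀ x ∈ L, x ∈ vals) :
    L.sum = (vals.map (fun v => v * (L.count v : Int))).sum := by
  induction vals generalizing L with
  | nil =>
    have : L = [] := by
      cases L with
      | nil => rfl
      | cons x t => exact absurd (hsub x (by simp)) (by simp)
    simp [this]
  | cons v rest ih =>
    have hperm := (List.filter_append_perm (fun x => x == v) L).sum_eq
    have hfil : (L.filter (fun x => x == v)).sum = v * (L.count v : Int) := by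
      rw [List.filter_beq, List.sum_replicate]
      simp [mul_comm]
    have hrest := ih (L.filter (fun x => !(x == v))) (List.Nodup.of_cons hnd)
      (by
        intro x hx
        rcases List.mem_filter.mp hx with ⟨hxL, hxv⟩
        rcases List.mem_cons.mp (hsub x hxL) with rfl | hmem
        · simp at hxv
        · exact hmem)
    have hcnt : ∀ w ∈ rest, (L.filter (fun x => !(x == v))).count w = L.count w := by
      intro w hw
      rw [count_filter_eq]
      have : w ≠ v := by
        rintro rfl
        exact (List.nodup_cons.mp hnd).1 hw
      simp [this]
    calc L.sum = (L.filter (fun x => x == v)).sum + (L.filter (fun x => !(x == v))).sum := by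
          rw [← hperm]; simp [List.sum_append]
      _ = v * (L.count v : Int) + (rest.map (fun w => w * ((L.filter (fun x => !(x == v))).count w : Int))).sum := by
          rw [hfil, hrest]
      _ = v * (L.count v : Int) + (rest.map (fun w => w * (L.count w : Int))).sum := by
          congr 1
          exact congrArg List.sum (List.map_congr_left (fun w hw => by rw [hcnt w hw]))
      _ = ((v :: rest).map (fun w => w * (L.count w : Int))).sum := by simp

-- two equal entries at distinct indices give count ≥ 2
theorem two_le_count_of_getElem (s : List Int) (i j : Nat) (hij : i < j) (hj : j < s.length)
    (a : Int) (h1 : s[i]'(by omega) = a) (h2 : s[j] = a) : 1 < s.count a := by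
  have hi' : i < (s.take j).length := by simp [List.length_take]; omega
  have ht : (s.take j)[i]'hi' = a := by rw [List.getElem_take]; exact h1
  have h₁ : List.Sublist [a] (s.take j) := List.singleton_sublist.mpr (ht ▸ List.getElem_mem hi')
  have hd' : 0 < (s.drop j).length := by simp [List.length_drop]; omega
  have hdt : (s.drop j)[0]'hd' = a := by rw [List.getElem_drop]; simpa using h2
  have h₂ : List.Sublist [a] (s.drop j) := List.singleton_sublist.mpr (hdt ▸ List.getElem_mem hd')
  have hsub : List.Sublist ([a] ++ [a]) (s.take j ++ s.drop j) := List.Sublist.append h₁ h₂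
  rw [List.take_append_drop] at hsub
  have := hsub.count_le a
  simpa using this

-- in a non-decreasing list, an entry has an equal neighbour iff its value occurs more than once
theorem nb_iff (s : List Int) (hs : s.Pairwise (· ≤ ·)) (k : Nat) (hk : k < s.length) :
    ((0 < k ∧ s.getD (k - 1) 0 = s[k]) ∨ (k + 1 < s.length ∧ s.getD (k + 1) 0 = s[k]))
      ↔ 1 < s.count s[k] := by
  have hmono : ∀ (p q : Nat) (hpq : p ≤ q) (hq : q < s.length), s[p]'(by omega) ≤ s[q] := by
    intro p q hpq hq
    rcases Nat.lt_or_ge p q with h | h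
    · exact List.pairwise_iff_getElem.mp hs p q (by omega) hq h
    · have : p = q := by omega
      subst this; rfl
  constructor
  · rintro (⟨hk0, he⟩ | ⟨hk1, he⟩)
    · refine two_le_count_of_getElem s (k - 1) k (by omega) hk _ ?_ rfl
      rw [← List.getD_eq_getElem s 0 (by omega : k - 1 < s.length)]; exact he
    · rw [List.getD_eq_getElem s 0 hk1] at he
      exact two_le_count_of_getElem s k (k + 1) (by omega) hk1 s[k] rfl he
  · intro hc
    by_contra hnb
    push Not at hnb
    obtain ⟨hL, hR⟩ := hnb
    -- only index k can hold the value s[k]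
    have honly : ∀ i : Nat, ∀ hi : i < s.length, i ≠ k → s[i] ≠ s[k] := by
      intro i hi hik he
      rcases Nat.lt_or_ge i k with h | h
      · have hk0 : 0 < k := by omega
        have h1 : s[i] ≤ s[k-1]'(by omega) := hmono i (k-1) (by omega) (by omega)
        have h2 : s[k-1]'(by omega) ≤ s[k] := hmono (k-1) k (by omega) hk
        have : s.getD (k-1) 0 = s[k] := by
          rw [List.getD_eq_getElem s 0 (by omega : k - 1 < s.length)]; omega
        exact absurd this (hL hk0)
      · have hik' : k < i := by omega
        have hi1 : k + 1 < s.length := by omega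
        have h1 : s[k] ≤ s[k+1] := hmono k (k+1) (by omega) hi1
        have h2 : s[k+1] ≤ s[i] := hmono (k+1) i (by omega) hi
        have : s.getD (k+1) 0 = s[k] := by
          rw [List.getD_eq_getElem s 0 hi1]; omega
        exact absurd this (hR hi1)
    -- decompose s around index k and count
    have hsplit : s = s.take k ++ s[k] :: s.drop (k + 1) := by
      conv_lhs => rw [← List.take_append_drop k s]
      congr 1
      exact (List.getElem_cons_drop hk).symm
    have hct := congrArg (List.count s[k]) hsplit
    rw [List.count_append, List.count_cons_self] at hct
    have h0t : (s.take k).count s[k] = 0 := by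
      rw [List.count_eq_zero]
      intro hm
      obtain ⟨i, hi, he⟩ := List.mem_iff_getElem.mp hm
      have hi' : i < k := by have := hi; simp [List.length_take] at this; omega
      have : (s.take k)[i]'hi = s[i]'(by omega) := List.getElem_take
      exact honly i (by omega) (by omega) (by rw [← this, he])
    have h0d : (s.drop (k+1)).count s[k] = 0 := by
      rw [List.count_eq_zero]
      intro hm
      obtain ⟨i, hi, he⟩ := List.mem_iff_getElem.mp hm
      have hi' : k + 1 + i < s.length := by have := hi; simp [List.length_drop] at this; omega
      have : (s.drop (k+1))[i]'hi = s[k+1+i]'hi' := List.getElem_drop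
      exact honly (k+1+i) hi' (by omega) (by rw [← this, he])
    omega

-- B's neighbour pass over the sorted list is the sum of the repeated values
theorem B_sum (s : List Int) (hs : s.Pairwise (· ≤ ·)) :
    (PySem.List.enumerate s).foldl (fun total kd =>
        if (0 < kd.1 ∧ PySem.List.pyGetD s (kd.1 - 1) 0 = kd.2) ∨
           (kd.1 + 1 < PySem.List.len s ∧ PySem.List.pyGetD s (kd.1 + 1) 0 = kd.2)
        then total + kd.2 else total) 0
      = (s.filter (fun d => decide (1 < s.count d))).sum := by
  have hcong : ∀ (acc : Int) (kd : Int × Int), kd ∈ PySem.List.enumerate s →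
      (if (0 < kd.1 ∧ PySem.List.pyGetD s (kd.1 - 1) 0 = kd.2) ∨
          (kd.1 + 1 < PySem.List.len s ∧ PySem.List.pyGetD s (kd.1 + 1) 0 = kd.2)
       then acc + kd.2 else acc)
      = (if 1 < s.count kd.2 then acc + kd.2 else acc) := by
    intro acc kd hkd
    rcases (PySem.List.mem_enumerate_iff _ _ _).mp hkd with ⟨k, hk, rfl⟩
    simp only [zero_add]
    have hiff : ((0 < ((k : Nat) : Int) ∧ PySem.List.pyGetD s (((k : Nat) : Int) - 1) 0 = s[k]) ∨
        (((k : Nat) : Int) + 1 < PySem.List.len s ∧ PySem.List.pyGetD s (((k : Nat) : Int) + 1) 0 = s[k]))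
        ↔ 1 < s.count s[k] := by
      rw [← nb_iff s hs k hk]
      constructor
      · rintro (⟨h1, h2⟩ | ⟨h1, h2⟩)
        · have hk0 : 0 < k := by exact_mod_cast h1
          left
          refine ⟨hk0, ?_⟩
          rw [show ((k : Nat) : Int) - 1 = ((k - 1 : Nat) : Int) by omega] at h2
          rwa [PySem.List.pyGetD_natCast] at h2
        · rw [PySem.List.len_eq] at h1
          have hk1 : k + 1 < s.length := by exact_mod_cast h1
          right
          refine ⟨hk1, ?_⟩
          rw [show ((k : Nat) : Int) + 1 = ((k + 1 : Nat) : Int) by push_cast; ring] at h2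
          rwa [PySem.List.pyGetD_natCast] at h2
      · rintro (⟨h1, h2⟩ | ⟨h1, h2⟩)
        · left
          refine ⟨by exact_mod_cast h1, ?_⟩
          rw [show ((k : Nat) : Int) - 1 = ((k - 1 : Nat) : Int) by omega,
            PySem.List.pyGetD_natCast]
          exact h2
        · right
          refine ⟨by rw [PySem.List.len_eq]; exact_mod_cast h1, ?_⟩
          rw [show ((k : Nat) : Int) + 1 = ((k + 1 : Nat) : Int) by push_cast; ring,
            PySem.List.pyGetD_natCast]
          exact h2
    rw [if_congr hiff rfl rfl]
  have hfold := PySem.List.foldl_congr_mem (PySem.List.enumerate s)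
    (f := fun (total : Int) (kd : Int × Int) =>
      if (0 < kd.1 ∧ PySem.List.pyGetD s (kd.1 - 1) 0 = kd.2) ∨
         (kd.1 + 1 < PySem.List.len s ∧ PySem.List.pyGetD s (kd.1 + 1) 0 = kd.2)
      then total + kd.2 else total)
    (g := fun (total : Int) (kd : Int × Int) => if 1 < s.count kd.2 then total + kd.2 else total)
    (init := (0 : Int)) hcong
  have h2 := List.foldl_map (f := (Prod.snd : Int × Int → Int))
    (g := fun (t : Int) (d : Int) => if 1 < s.count d then t + d else t)
    (l := PySem.List.enumerate s) (init := (0 : Int))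
  simp only [PySem.List.map_snd_enumerate] at h2
  rw [hfold, ← h2, PySem.List.foldl_ite_eq_foldl_filter (p := fun d => 1 < s.count d)]
  rw [PySem.List.foldl_add (g := fun d => d)]
  simp

theorem f_eq (number : Int) (h : 0 ≤ number) : f number = f_alt number := by
  unfold f f_alt
  simp only [PySem.Int.toList_toStr]
  have hpw : (PySem.List.sorted ((PySem.Int.toChars number).map pvDigit) (fun x => x) false).Pairwise (· ≤ ·) := by
    simpa using PySem.List.sorted_pairwise (xs := (PySem.Int.toChars number).map pvDigit) (key := fun x => x)
  rw [B_sum _ hpw]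
  have hperm : (PySem.List.sorted ((PySem.Int.toChars number).map pvDigit) (fun x => x) false).Perm
      ((PySem.Int.toChars number).map pvDigit) := PySem.List.sorted_perm _ _ _
  have hq : (fun d => decide (1 < (PySem.List.sorted ((PySem.Int.toChars number).map pvDigit) (fun x => x) false).count d))
      = (fun d => decide (1 < ((PySem.Int.toChars number).map pvDigit).count d)) := by
    funext d; rw [hperm.count_eq]
  rw [hq, (hperm.filter _).sum_eq]
  have hb : ∀ x ∈ ((PySem.Int.toChars number).map pvDigit).filter
      (fun d => decide (1 < ((PySem.Int.toChars number).map pvDigit).count d)),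
      x ∈ ([0, 1, 2, 3, 4, 5, 6, 7, 8, 9] : List Int) := by
    intro x hx
    have hxM := (List.mem_filter.mp hx).1
    rcases List.mem_map.mp hxM with ⟨c, hc, rfl⟩
    have := toChars_bound number h c hc
    simp only [List.mem_cons]
    omega
  rw [sum_eq_counts _ _ (by decide) hb]
  simp only [count_fold, zero_add, count_filter_eq]
  rw [show PySem.List.pyRange 1 10 1 = [1, 2, 3, 4, 5, 6, 7, 8, 9] from by decide]
  rw [foldl_if_add _ (fun i => ((((PySem.Int.toChars number).map pvDigit).count i : Int)) > 1)
    (fun i => i * (((PySem.Int.toChars number).map pvDigit).count i : Int)) 0]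
  simp [mul_ite, apply_ite (fun n : Nat => (n : Int)), Nat.one_lt_cast]

-- ===== VERDICT (by name: the statement is the Claim_ definition above) =====
theorem f_spec : Claim_equal_f := by
  intro number _ hpre
  unfold Spec_f
  exact f_eq number hpre
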